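-- pv_equiv track=rewrite | github.com/msucse2004/american_computer_science_league | elementary_division/computer_number_system/decimal_to_binary/decimal_to_binary.py | get_answer_for_digit_count_problem
-- ===== SOURCE A (Python) =====
-- def get_answer_for_digit_count_problem(comparision_choice: int, start_number: int, end_number: int) -> str:
--     count = 0
--     for number in range(start_number, end_number + 1):
--         binary_representation = bin(number)[2:]  # Convert to binary and remove the '0b' prefix
--         count_ones = binary_representation.count('1')
--         count_zeros = binary_representation.count('0')
--
--         # Check the condition based on the comparison choice
--         if comparision_choice == 0:  # more 0s than 1s
--             if count_zeros > count_ones: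
--                 count += 1
--         elif comparision_choice == 1:  # more 1s than 0s
--             if count_ones > count_zeros:
--                 count += 1
--         elif comparision_choice == 2:  # an equal number of 1s and 0s
--             if count_ones == count_zeros:
--                 count += 1
--
--     return str(count)
-- ===== SOURCE B (Python) =====
-- # Combinatorial digit counting over nonnegative integers: numbers are grouped by bit
-- # length and counted with binomial coefficients, so the range is never enumerated.
--
-- def _comb(n, k):
--     # binomial coefficient via an iteratively built Pascal row
--     if k > n:
--         return 0
--     row = [1]
--     for _ in range(n):
--         row = [1] + [row[i] + row[i + 1] for i in range(len(row) - 1)] + [1]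
--     return row[k]
--
--
-- def _bitlen(m):
--     # bit length of m >= 0
--     l = 0
--     while m > 0:
--         l += 1
--         m //= 2
--     return l
--
--
-- def _ok(choice, ones, length):
--     # condition on a binary word with `ones` ones among `length` digits
--     zeros = length - ones
--     if choice == 0:
--         return zeros > ones
--     if choice == 1:
--         return ones > zeros
--     if choice == 2:
--         return ones == zeros
--     return False
--
--
-- def _N(x, p):
--     # number of r in [0, x) with popcount(r) == p   (x >= 0)
--     if x <= 0:
--         return 0
--     a = _bitlen(x) - 1
--     res = _comb(a, p) if p <= a else 0
--     if p >= 1: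
--         res += _N(x - 2 ** a, p - 1)
--     return res
--
--
-- def _F(choice, m):
--     # number of n in [1, m] whose binary digits satisfy _ok   (m >= 0)
--     if m <= 0:
--         return 0
--     L = _bitlen(m)
--     total = 0
--     # full blocks: all numbers of bit length l < L (leading 1 plus l-1 free bits)
--     for l in range(1, L):
--         for p in range(0, l):
--             if _ok(choice, p + 1, l):
--                 total += _comb(l - 1, p)
--     # numbers of bit length L that are <= m: 2^(L-1) + r with r in [0, m - 2^(L-1)]
--     r0 = m - 2 ** (L - 1)
--     for p in range(0, L):
--         if _ok(choice, p + 1, L):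
--             total += _N(r0 + 1, p)
--     return total
--
--
-- def _count_upto(choice, m):
--     # number of n in [0, m] whose binary digits satisfy _ok
--     if m < 0:
--         return 0
--     zero_term = 1 if choice == 0 else 0  # 0 is written "0": one zero, no ones
--     return zero_term + _F(choice, m)
--
--
-- def get_answer_for_digit_count_problem(comparision_choice: int, start_number: int, end_number: int) -> str:
--     if start_number > end_number:
--         return "0"
--     return str(_count_upto(comparision_choice, end_number)
--                - _count_upto(comparision_choice, start_number - 1))
-- ===== Notes on version B (the rewrite author's own statement) =====
-- stated objective: alternative
-- what changed: B replaces A's scan of every integer in the range with combinatorial digit counting (numbers grouped by bit length, counted with binomial coefficients plus a popcount-below-x recursion), so the range is never enumerated; Pre_ restricts to the task's natural nonnegative domain, excluding nonempty ranges that reach below 0 under a recognised choice (0/1/2), where bin(n)[2:] leaves a stray 'b' so A counts a negative number as its absolute value.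
-- outside the precondition, e.g. on get_answer_for_digit_count_problem(0, -4, -4): A returns '1', B returns '0'
import Mathlib
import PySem

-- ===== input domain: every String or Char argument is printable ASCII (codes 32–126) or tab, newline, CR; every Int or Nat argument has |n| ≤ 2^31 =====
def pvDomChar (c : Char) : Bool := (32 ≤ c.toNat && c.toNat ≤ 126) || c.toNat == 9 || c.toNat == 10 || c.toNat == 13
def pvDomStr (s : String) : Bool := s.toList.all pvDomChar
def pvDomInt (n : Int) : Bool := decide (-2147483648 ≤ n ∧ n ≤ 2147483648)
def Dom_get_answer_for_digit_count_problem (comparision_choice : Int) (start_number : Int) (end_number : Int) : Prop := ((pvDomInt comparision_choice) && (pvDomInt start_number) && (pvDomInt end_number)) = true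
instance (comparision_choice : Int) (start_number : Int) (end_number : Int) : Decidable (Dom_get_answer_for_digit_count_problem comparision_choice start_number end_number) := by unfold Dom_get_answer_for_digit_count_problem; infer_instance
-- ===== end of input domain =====

-- B counts combinatorially (grouping by bit length, binomial counting) instead of scanning the
-- range; Pre_ restricts to nonnegative ranges (see the sentence above Pre_).

-- ===== PORT A =====
-- literal port of A: for number in range(start, end+1): count the '1'/'0' characters of bin(number)[2:]
def get_answer_for_digit_count_problem (comparision_choice : Int) (start_number : Int) (end_number : Int) : String :=
  let count : Int :=
    (PySem.List.pyRange start_number (end_number + 1) 1).foldl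
      (fun count number =>
        let binary_representation := PySem.Str.slice (PySem.Int.pyBin number) (some 2) none
        let count_ones := PySem.Str.count binary_representation "1"
        let count_zeros := PySem.Str.count binary_representation "0"
        if comparision_choice == 0 then
          (if count_zeros > count_ones then count + 1 else count)
        else if comparision_choice == 1 then
          (if count_ones > count_zeros then count + 1 else count)
        else if comparision_choice == 2 then
          (if count_ones == count_zeros then count + 1 else count)
        else count)
      0
  PySem.Int.toStr count

-- ===== PORT B =====
-- binomial coefficient via an iteratively built Pascal row (port of _comb)
def pvComb (n k : Nat) : Nat :=
  if k > n then 0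
  else
    ((List.range n).foldl
      (fun row _ => (1 :: (List.range (row.length - 1)).map (fun i => row.getD i 0 + row.getD (i + 1) 0)) ++ [1])
      [1]).getD k 0

-- bit length of m (port of _bitlen's halving loop)
def pvBitlen : Nat → Nat
  | 0 => 0
  | m + 1 => pvBitlen ((m + 1) / 2) + 1
decreasing_by exact Nat.div_lt_self (Nat.succ_pos m) (by omega)

-- port of _ok
def pvOk (choice : Int) (ones length : Nat) : Bool :=
  let zeros := length - ones
  if choice == 0 then decide (zeros > ones)
  else if choice == 1 then decide (ones > zeros)
  else if choice == 2 then ones == zeros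
  else false

-- port of _N: number of r in [0, x) with popcount r = p
def pvN (x p : Nat) : Nat :=
  if hx : x = 0 then 0
  else
    let a := pvBitlen x - 1
    let res := if p ≤ a then pvComb a p else 0
    match p with
    | 0 => res
    | q + 1 => res + pvN (x - 2 ^ a) q
termination_by x
decreasing_by
  have h2 : 0 < 2 ^ (pvBitlen x - 1) := Nat.pow_pos (by omega)
  omega

-- port of _F: number of n in [1, m] whose binary digits satisfy pvOk
def pvF (choice : Int) (m : Nat) : Nat :=
  if m = 0 then 0
  else
    let L := pvBitlen m
    let total :=
      (List.range' 1 (L - 1)).foldl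
        (fun total l =>
          (List.range l).foldl
            (fun total p => if pvOk choice (p + 1) l then total + pvComb (l - 1) p else total)
            total)
        0
    let r0 := m - 2 ^ (L - 1)
    (List.range L).foldl
      (fun total p => if pvOk choice (p + 1) L then total + pvN (r0 + 1) p else total)
      total

-- port of _count_upto: number of n in [0, m] whose binary digits satisfy pvOk
def pvCountUpto (choice : Int) (m : Int) : Int :=
  if m < 0 then 0
  else
    let zero_term : Int := if choice == 0 then 1 else 0
    zero_term + (pvF choice m.toNat : Int)

def get_answer_for_digit_count_problem_alt (comparision_choice : Int) (start_number : Int) (end_number : Int) : String :=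
  if start_number > end_number then "0"
  else
    PySem.Int.toStr
      (pvCountUpto comparision_choice end_number - pvCountUpto comparision_choice (start_number - 1))

-- ===== PRECONDITION & SPEC =====
-- Pre_ restricts to the task's natural domain (counting the binary digits of nonnegative
-- integers): it excludes nonempty ranges reaching below 0 under one of the three recognised
-- comparison choices, where bin(n)[2:] leaves a stray 'b' and A counts a negative number as
-- its absolute value — an artefact of the slice.
def Pre_get_answer_for_digit_count_problem (comparision_choice : Int) (start_number : Int) (end_number : Int) : Prop :=
  start_number > end_number ∨ 0 ≤ start_number
  ∨ ¬(comparision_choice = 0 ∨ comparision_choice = 1 ∨ comparision_choice = 2)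
instance (comparision_choice : Int) (start_number : Int) (end_number : Int) : Decidable (Pre_get_answer_for_digit_count_problem comparision_choice start_number end_number) := by unfold Pre_get_answer_for_digit_count_problem; infer_instance

def pvWitness_get_answer_for_digit_count_problem : Int × Int × Int := (1, 0, 12)

def Spec_get_answer_for_digit_count_problem (comparision_choice : Int) (start_number : Int) (end_number : Int) (out : String) : Prop := out = get_answer_for_digit_count_problem_alt comparision_choice start_number end_number
instance (comparision_choice : Int) (start_number : Int) (end_number : Int) (out : String) : Decidable (Spec_get_answer_for_digit_count_problem comparision_choice start_number end_number out) := by unfold Spec_get_answer_for_digit_count_problem; infer_instance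

-- ===== CLAIM (what is proved, stated in full; the proofs are below) =====
def Claim_equal_get_answer_for_digit_count_problem : Prop := ∀ (comparision_choice : Int) (start_number : Int) (end_number : Int), Dom_get_answer_for_digit_count_problem comparision_choice start_number end_number → Pre_get_answer_for_digit_count_problem comparision_choice start_number end_number → Spec_get_answer_for_digit_count_problem comparision_choice start_number end_number (get_answer_for_digit_count_problem comparision_choice start_number end_number)

-- ===== LEMMAS AND PROOFS =====

-- popcount, the proof-side characterisation of A's '1'-count
def popCnt : Nat → Nat
  | 0 => 0
  | m + 1 => popCnt ((m + 1) / 2) + (m + 1) % 2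
decreasing_by exact Nat.div_lt_self (Nat.succ_pos m) (by omega)

-- the per-number condition A tests, phrased on the integer itself
def condA (c : Int) (n : Int) : Bool :=
  if n = 0 then c == 0 else pvOk c (popCnt n.natAbs) (pvBitlen n.natAbs)

-- ---- elementary recursion equations ----
theorem popCnt_eq (n : Nat) (h : n ≠ 0) : popCnt n = popCnt (n / 2) + n % 2 := by
  cases n with
  | zero => omega
  | succ m => rw [popCnt]

theorem pvBitlen_eq (n : Nat) (h : n ≠ 0) : pvBitlen n = pvBitlen (n / 2) + 1 := by
  cases n with
  | zero => omega
  | succ m => rw [pvBitlen]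

theorem pvBitlen_pos (m : Nat) (h : m ≠ 0) : 1 ≤ pvBitlen m := by
  rw [pvBitlen_eq m h]; omega

theorem pvBitlen_bounds (m : Nat) (h : m ≠ 0) :
    2 ^ (pvBitlen m - 1) ≤ m ∧ m < 2 ^ pvBitlen m := by
  induction m using Nat.strong_induction_on with
  | _ m ih =>
    rcases Nat.lt_or_ge m 2 with h2 | h2
    · have hm1 : m = 1 := by omega
      subst hm1
      have : pvBitlen 1 = 1 := by
        rw [pvBitlen_eq 1 (by omega)]
        norm_num [pvBitlen]
      rw [this]; omega
    · have hq : m / 2 ≠ 0 := by omega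
      have hih := ih (m / 2) (by omega) hq
      have hb1 : 1 ≤ pvBitlen (m / 2) := pvBitlen_pos _ hq
      rw [pvBitlen_eq m h]
      set b := pvBitlen (m / 2) with hb
      have hpow : 2 ^ b = 2 * 2 ^ (b - 1) := by
        conv_lhs => rw [show b = (b - 1) + 1 by omega]
        rw [pow_succ]; ring
      have hpow2 : 2 ^ (b + 1) = 2 * 2 ^ b := by rw [pow_succ]; ring
      have hred : b + 1 - 1 = b := by omega
      rw [hred]
      omega

theorem pvBitlen_unique (n l : Nat) (hl : 1 ≤ l) (h1 : 2 ^ (l - 1) ≤ n) (h2 : n < 2 ^ l) :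
    pvBitlen n = l := by
  have hn : n ≠ 0 := by
    have : 0 < 2 ^ (l - 1) := Nat.pow_pos (by omega)
    omega
  obtain ⟨hb1, hb2⟩ := pvBitlen_bounds n hn
  have hbpos : 1 ≤ pvBitlen n := pvBitlen_pos n hn
  rcases lt_trichotomy (pvBitlen n) l with hlt | heq | hgt
  · have : 2 ^ pvBitlen n ≤ 2 ^ (l - 1) := Nat.pow_le_pow_right (by omega) (by omega)
    omega
  · exact heq
  · have : 2 ^ l ≤ 2 ^ (pvBitlen n - 1) := Nat.pow_le_pow_right (by omega) (by omega)
    omega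

theorem popCnt_le_bitlen (n : Nat) : popCnt n ≤ pvBitlen n := by
  induction n using Nat.strong_induction_on with
  | _ n ih =>
    rcases eq_or_ne n 0 with h | h
    · subst h; norm_num [popCnt, pvBitlen]
    · rw [popCnt_eq n h, pvBitlen_eq n h]
      have := ih (n / 2) (by omega)
      omega

theorem pvBitlen_lt_of_lt_pow (r t : Nat) (h : r < 2 ^ t) : pvBitlen r ≤ t := by
  rcases eq_or_ne r 0 with h0 | h0
  · subst h0; norm_num [pvBitlen]
  · obtain ⟨hb1, hb2⟩ := pvBitlen_bounds r h0
    by_contra hgt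
    have : 2 ^ t ≤ 2 ^ (pvBitlen r - 1) := Nat.pow_le_pow_right (by omega) (by omega)
    omega

theorem popCnt_add_pow (t r : Nat) (h : r < 2 ^ t) : popCnt (2 ^ t + r) = popCnt r + 1 := by
  induction t generalizing r with
  | zero =>
    have hr0 : r = 0 := by omega
    subst hr0
    have h1 : 2 ^ 0 + 0 = 1 := by norm_num
    rw [h1, popCnt_eq 1 (by omega)]
  | succ t ih =>
    have hp : 2 ^ (t + 1) = 2 * 2 ^ t := by rw [pow_succ]; ring
    have hpos : 0 < 2 ^ (t + 1) := Nat.pow_pos (by omega)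
    rw [popCnt_eq (2 ^ (t + 1) + r) (by omega)]
    have hdiv : (2 ^ (t + 1) + r) / 2 = 2 ^ t + r / 2 := by omega
    have hmod : (2 ^ (t + 1) + r) % 2 = r % 2 := by omega
    rw [hdiv, hmod, ih (r / 2) (by omega)]
    rcases eq_or_ne r 0 with h0 | h0
    · subst h0; norm_num [popCnt]
    · rw [popCnt_eq r h0]; omega

theorem pvBitlen_add_pow (t r : Nat) (h : r < 2 ^ t) : pvBitlen (2 ^ t + r) = t + 1 := by
  refine pvBitlen_unique (2 ^ t + r) (t + 1) (by omega) ?_ ?_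
  · have hred : t + 1 - 1 = t := by omega
    rw [hred]
    omega
  · have hp : 2 ^ (t + 1) = 2 * 2 ^ t := by rw [pow_succ]; ring
    omega

-- ---- Pascal row = binomials ----
theorem pascal_row (n : Nat) :
    (List.range n).foldl
      (fun row _ => (1 :: (List.range (row.length - 1)).map (fun i => row.getD i 0 + row.getD (i + 1) 0)) ++ [1])
      [1]
    = (List.range (n + 1)).map (fun k => n.choose k) := by
  induction n with
  | zero => decide
  | succ n ih =>
    rw [List.range_succ, List.foldl_append, ih]
    simp only [List.foldl_cons, List.foldl_nil, List.length_map, List.length_range,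
      Nat.add_sub_cancel]
    have hget : ∀ i, i < n + 1 →
        ((List.range (n + 1)).map (fun k => n.choose k)).getD i 0 = n.choose i := by
      intro i hi
      exact PySem.List.getD_map_range _ _ _ _ hi
    have hmapeq : (List.range n).map
          (fun i => ((List.range (n + 1)).map (fun k => n.choose k)).getD i 0
            + ((List.range (n + 1)).map (fun k => n.choose k)).getD (i + 1) 0)
        = (List.range n).map (fun i => (n + 1).choose (i + 1)) := by
      apply List.map_congr_left
      intro i hi
      have hi' : i < n := List.mem_range.mp hi
      rw [hget i (by omega), hget (i + 1) (by omega), ← Nat.choose_succ_succ']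
    rw [hmapeq]
    have hrhs : (List.range (n + 1 + 1)).map (fun k => (n + 1).choose k)
        = ((List.range (n + 1)).map (fun k => (n + 1).choose k)) ++ [1] := by
      rw [List.range_succ, List.map_append]
      simp [Nat.choose_self]
    rw [hrhs]
    have hfront : (List.range (n + 1)).map (fun k => (n + 1).choose k)
        = 1 :: (List.range n).map (fun i => (n + 1).choose (i + 1)) := by
      rw [List.range_succ_eq_map, List.map_cons, List.map_map]
      simp [Nat.choose_zero_right, Function.comp]
    rw [hfront]

theorem pvComb_eq_choose (n k : Nat) : pvComb n k = n.choose k := by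
  unfold pvComb
  split_ifs with h
  · exact (Nat.choose_eq_zero_of_lt h).symm
  · rw [pascal_row, PySem.List.getD_map_range _ _ _ _ (by omega)]

-- ---- counting lemmas ----
theorem countP_range_pow (t p : Nat) :
    (List.range (2 ^ t)).countP (fun r => popCnt r == p) = t.choose p := by
  induction t generalizing p with
  | zero =>
    have h1 : List.range (2 ^ 0) = [0] := by decide
    rw [h1]
    have hpc : popCnt 0 = 0 := by norm_num [popCnt]
    cases p with
    | zero => simp [List.countP_cons, hpc]
    | succ q => simp [List.countP_cons, hpc, Nat.choose]
  | succ t ih =>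
    have hsp : 2 ^ (t + 1) = 2 ^ t + 2 ^ t := by rw [pow_succ]; omega
    rw [hsp, List.range_add, List.countP_append, List.countP_map]
    have hcongr : (List.range (2 ^ t)).countP ((fun r => popCnt r == p) ∘ (fun x => 2 ^ t + x))
        = (List.range (2 ^ t)).countP (fun r => popCnt r + 1 == p) := by
      apply List.countP_congr
      intro r hr
      have hrlt : r < 2 ^ t := List.mem_range.mp hr
      simp [Function.comp, popCnt_add_pow t r hrlt]
    rw [hcongr]
    cases p with
    | zero =>
      have hz : (List.range (2 ^ t)).countP (fun r => popCnt r + 1 == 0) = 0 := by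
        rw [List.countP_eq_zero]; intro a _; simp
      rw [ih 0, hz]
      simp [Nat.choose]
    | succ q =>
      have hq : (List.range (2 ^ t)).countP (fun r => popCnt r + 1 == q + 1)
          = (List.range (2 ^ t)).countP (fun r => popCnt r == q) := by
        apply List.countP_congr; intro r _; simp
      rw [hq, ih (q + 1), ih q, Nat.choose_succ_succ']
      omega

theorem pvN_eq_zero (x : Nat) (hx : x ≠ 0) :
    pvN x 0 = (if 0 ≤ pvBitlen x - 1 then pvComb (pvBitlen x - 1) 0 else 0) := by
  rw [pvN, dif_neg hx]

theorem pvN_eq_succ (x q : Nat) (hx : x ≠ 0) :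
    pvN x (q + 1) = (if q + 1 ≤ pvBitlen x - 1 then pvComb (pvBitlen x - 1) (q + 1) else 0)
      + pvN (x - 2 ^ (pvBitlen x - 1)) q := by
  rw [pvN, dif_neg hx]

theorem pvN_correct (x p : Nat) :
    pvN x p = (List.range x).countP (fun r => popCnt r == p) := by
  induction x using Nat.strong_induction_on generalizing p with
  | _ x ih =>
    rcases eq_or_ne x 0 with h0 | h0
    · subst h0; rw [pvN]; simp
    · have hb1 : 1 ≤ pvBitlen x := pvBitlen_pos x h0
      obtain ⟨hl, hr⟩ := pvBitlen_bounds x h0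
      have hxa2 : x < 2 ^ (pvBitlen x - 1 + 1) := by
        have hba : pvBitlen x - 1 + 1 = pvBitlen x := by omega
        rw [hba]; exact hr
      have hpow : 2 ^ (pvBitlen x - 1 + 1) = 2 ^ (pvBitlen x - 1) + 2 ^ (pvBitlen x - 1) := by
        rw [pow_succ]; omega
      have hy : x - 2 ^ (pvBitlen x - 1) < 2 ^ (pvBitlen x - 1) := by omega
      have hsplit : x = 2 ^ (pvBitlen x - 1) + (x - 2 ^ (pvBitlen x - 1)) := by omega
      have hfirst : ∀ p', (if p' ≤ pvBitlen x - 1 then pvComb (pvBitlen x - 1) p' else 0)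
          = (pvBitlen x - 1).choose p' := by
        intro p'
        split_ifs with h
        · exact pvComb_eq_choose _ p'
        · exact (Nat.choose_eq_zero_of_lt (by omega)).symm
      have hcongr : ∀ p', (List.range (x - 2 ^ (pvBitlen x - 1))).countP
            ((fun r => popCnt r == p') ∘ (fun k => 2 ^ (pvBitlen x - 1) + k))
          = (List.range (x - 2 ^ (pvBitlen x - 1))).countP (fun r => popCnt r + 1 == p') := by
        intro p'
        apply List.countP_congr
        intro r hr
        have hrlt : r < 2 ^ (pvBitlen x - 1) := by have := List.mem_range.mp hr; omega
        simp [Function.comp, popCnt_add_pow (pvBitlen x - 1) r hrlt]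
      conv_rhs => rw [hsplit]
      rw [List.range_add, List.countP_append, List.countP_map, hcongr p,
          countP_range_pow (pvBitlen x - 1) p]
      cases p with
      | zero =>
        have hz : (List.range (x - 2 ^ (pvBitlen x - 1))).countP (fun r => popCnt r + 1 == 0) = 0 := by
          rw [List.countP_eq_zero]; intro r _; simp
        rw [pvN_eq_zero x h0, hfirst 0, hz]
        omega
      | succ q =>
        have hq : (List.range (x - 2 ^ (pvBitlen x - 1))).countP (fun r => popCnt r + 1 == q + 1)
            = (List.range (x - 2 ^ (pvBitlen x - 1))).countP (fun r => popCnt r == q) := by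
          apply List.countP_congr; intro r _; simp
        rw [pvN_eq_succ x q h0, hfirst (q + 1), hq, ih (x - 2 ^ (pvBitlen x - 1)) (by omega) q]

-- fold an 'if c then t + g else t' loop into a sum
theorem foldl_if_add_nat {α : Type} (l : List α) (c : α → Bool) (g : α → Nat) (init : Nat) :
    l.foldl (fun t x => if c x then t + g x else t) init
      = init + (l.map (fun x => if c x then g x else 0)).sum := by
  induction l generalizing init with
  | nil => simp
  | cons h t ih => by_cases hc : c h <;> simp [hc, ih] <;> omega

theorem sum_map_add_nat {α : Type} (l : List α) (f g : α → Nat) :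
    (l.map (fun x => f x + g x)).sum = (l.map f).sum + (l.map g).sum := by
  induction l with
  | nil => simp
  | cons h t ih => simp [ih]; omega

theorem delta_zero (q : Nat → Bool) (B v : Nat) (h : B ≤ v) :
    ((List.range B).map (fun p => if q p ∧ v = p then (1 : Nat) else 0)).sum = 0 := by
  apply List.sum_eq_zero
  intro x hx
  simp only [List.mem_map] at hx
  obtain ⟨p, hp, rfl⟩ := hx
  have hplt := List.mem_range.mp hp
  have hne : v ≠ p := by omega
  simp [hne]

theorem delta_sum (q : Nat → Bool) (B v : Nat) (h : v < B) :
    ((List.range B).map (fun p => if q p ∧ v = p then (1 : Nat) else 0)).sum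
      = if q v then 1 else 0 := by
  induction B with
  | zero => omega
  | succ B ih =>
    rw [List.range_succ, List.map_append, List.sum_append]
    rcases eq_or_ne v B with rfl | hne
    · rw [delta_zero q v v (le_refl v)]
      simp
    · have hvB : v < B := by omega
      rw [ih hvB]
      simp [hne]

-- partition a count by the value of f
theorem countP_partition (l : List Nat) (q : Nat → Bool) (f : Nat → Nat) (B : Nat)
    (h : ∀ r ∈ l, f r < B) :
    l.countP (fun r => q (f r))
      = ((List.range B).map (fun p => if q p then l.countP (fun r => f r == p) else 0)).sum := by
  induction l with
  | nil =>
    simp only [List.countP_nil]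
    symm
    apply List.sum_eq_zero
    intro x hx
    simp only [List.mem_map] at hx
    obtain ⟨p, _, rfl⟩ := hx
    split_ifs <;> rfl
  | cons a t ih =>
    have hfa : f a < B := h a (by simp)
    have ht : ∀ r ∈ t, f r < B := fun r hr => h r (by simp [hr])
    have hpt : ∀ p ∈ List.range B, (if q p then (a :: t).countP (fun r => f r == p) else 0)
        = (if q p then t.countP (fun r => f r == p) else 0) + (if q p ∧ f a = p then 1 else 0) := by
      intro p _
      rw [List.countP_cons]
      by_cases hq : q p <;> by_cases hf : f a = p <;> simp [hq, hf]
    rw [List.countP_cons, List.map_congr_left hpt, sum_map_add_nat, ih ht,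
        delta_sum q B (f a) hfa]

-- ---- F is the count over [1, m] ----
def goodN (c : Int) (n : Nat) : Bool := pvOk c (popCnt n) (pvBitlen n)

theorem block_count (c : Int) (t : Nat) (y : Nat) (hy : y ≤ 2 ^ t) :
    ((List.range y).map (fun r => 2 ^ t + r)).countP (goodN c)
      = ((List.range (t + 1)).map (fun p => if pvOk c (p + 1) (t + 1)
            then (List.range y).countP (fun r => popCnt r == p) else 0)).sum := by
  rw [List.countP_map]
  have hc : (List.range y).countP ((goodN c) ∘ (fun r => 2 ^ t + r))
      = (List.range y).countP (fun r => pvOk c (popCnt r + 1) (t + 1)) := by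
    apply List.countP_congr
    intro r hr
    have hrlt : r < 2 ^ t := by have := List.mem_range.mp hr; omega
    simp [Function.comp, goodN, popCnt_add_pow t r hrlt, pvBitlen_add_pow t r hrlt]
  rw [hc]
  exact countP_partition (List.range y) (fun p => pvOk c (p + 1) (t + 1)) popCnt (t + 1)
    (fun r hr => by
      have hrlt : r < 2 ^ t := by have := List.mem_range.mp hr; omega
      have h1 := pvBitlen_lt_of_lt_pow r t hrlt
      have h2 := popCnt_le_bitlen r
      omega)

theorem full_blocks (c : Int) (t : Nat) :
    (List.range' 1 (2 ^ t - 1)).countP (goodN c)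
      = ((List.range' 1 t).map (fun l =>
          ((List.range l).map (fun p => if pvOk c (p + 1) l then (l - 1).choose p else 0)).sum)).sum := by
  induction t with
  | zero => simp
  | succ t ih =>
    have hpos : 0 < 2 ^ t := Nat.pow_pos (by omega)
    have hp : 2 ^ (t + 1) = 2 * 2 ^ t := by rw [pow_succ]; ring
    have hsplit : (2 ^ (t + 1) - 1) = (2 ^ t - 1) + 2 ^ t := by omega
    rw [hsplit, ← List.range'_append, List.countP_append, ih]
    have harg : 1 + 1 * (2 ^ t - 1) = 2 ^ t := by omega
    rw [harg]
    have hsecond : (List.range' (2 ^ t) (2 ^ t)).countP (goodN c)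
        = ((List.range (t + 1)).map (fun p => if pvOk c (p + 1) (t + 1) then t.choose p else 0)).sum := by
      rw [List.range'_eq_map_range, block_count c t (2 ^ t) (le_refl _)]
      apply congrArg List.sum
      apply List.map_congr_left
      intro p _
      rw [countP_range_pow t p]
    rw [hsecond]
    have hr1 : List.range' 1 (t + 1) = List.range' 1 t ++ [1 + 1 * t] := by
      rw [List.range'_concat]
    rw [hr1, List.map_append, List.sum_append]
    simp only [List.map_cons, List.map_nil, List.sum_cons, List.sum_nil, add_zero]
    congr 1
    have h1t : 1 + 1 * t = t + 1 := by omega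
    rw [h1t]
    simp only [Nat.add_sub_cancel]

theorem pvF_eq (c : Int) (m : Nat) (h : m ≠ 0) :
    pvF c m = (List.range (pvBitlen m)).foldl
        (fun total p => if pvOk c (p + 1) (pvBitlen m)
          then total + pvN (m - 2 ^ (pvBitlen m - 1) + 1) p else total)
        ((List.range' 1 (pvBitlen m - 1)).foldl
          (fun total l => (List.range l).foldl
            (fun total p => if pvOk c (p + 1) l then total + pvComb (l - 1) p else total) total) 0) := by
  unfold pvF
  rw [if_neg h]

theorem foldl_add_gen {α : Type} (l : List α) (g : α → Nat) (init : Nat) :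
    l.foldl (fun t x => t + g x) init = init + (l.map g).sum := by
  induction l generalizing init with
  | nil => simp
  | cons h t ih => simp [ih]; omega

theorem pvF_correct (c : Int) (m : Nat) :
    pvF c m = (List.range' 1 m).countP (goodN c) := by
  rcases eq_or_ne m 0 with rfl | h
  · simp [pvF]
  · obtain ⟨hl, hr⟩ := pvBitlen_bounds m h
    have hb1 : 1 ≤ pvBitlen m := pvBitlen_pos m h
    have hpw : 2 ^ pvBitlen m = 2 ^ (pvBitlen m - 1) + 2 ^ (pvBitlen m - 1) := by
      conv_lhs => rw [show pvBitlen m = (pvBitlen m - 1) + 1 by omega]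
      rw [pow_succ]; omega
    have hpos : 0 < 2 ^ (pvBitlen m - 1) := Nat.pow_pos (by omega)
    rw [pvF_eq c m h]
    -- the nested double loop is the sum over full blocks
    have hinner : ∀ (l : Nat) (tot : Nat), (List.range l).foldl
          (fun total p => if pvOk c (p + 1) l then total + pvComb (l - 1) p else total) tot
        = tot + ((List.range l).map (fun p => if pvOk c (p + 1) l then (l - 1).choose p else 0)).sum := by
      intro l tot
      rw [foldl_if_add_nat]
      congr 1
      apply congrArg List.sum
      apply List.map_congr_left
      intro p _
      by_cases hok : pvOk c (p + 1) l <;> simp [hok, pvComb_eq_choose]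
    have hbody : (fun (tot : Nat) (l : Nat) => (List.range l).foldl
          (fun total p => if pvOk c (p + 1) l then total + pvComb (l - 1) p else total) tot)
        = (fun tot l => tot + ((List.range l).map
            (fun p => if pvOk c (p + 1) l then (l - 1).choose p else 0)).sum) := by
      funext tot l
      exact hinner l tot
    rw [hbody, foldl_add_gen, foldl_if_add_nat]
    rw [← full_blocks c (pvBitlen m - 1)]
    -- the last loop is the partial top block
    have hlast : (List.range (pvBitlen m)).map
          (fun p => if pvOk c (p + 1) (pvBitlen m) then pvN (m - 2 ^ (pvBitlen m - 1) + 1) p else 0)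
        = (List.range (pvBitlen m)).map
          (fun p => if pvOk c (p + 1) (pvBitlen m)
            then (List.range (m - 2 ^ (pvBitlen m - 1) + 1)).countP (fun r => popCnt r == p) else 0) := by
      apply List.map_congr_left
      intro p _
      by_cases hok : pvOk c (p + 1) (pvBitlen m) <;> simp [hok, pvN_correct]
    rw [hlast]
    -- split [1, m] at the top block
    have hmsplit : m = (2 ^ (pvBitlen m - 1) - 1) + (m - 2 ^ (pvBitlen m - 1) + 1) := by omega
    conv_rhs => rw [hmsplit]
    rw [← List.range'_append, List.countP_append]
    have harg : 1 + 1 * (2 ^ (pvBitlen m - 1) - 1) = 2 ^ (pvBitlen m - 1) := by omega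
    rw [harg]
    have htop : (List.range' (2 ^ (pvBitlen m - 1)) (m - 2 ^ (pvBitlen m - 1) + 1)).countP (goodN c)
        = ((List.range (pvBitlen m - 1 + 1)).map (fun p => if pvOk c (p + 1) (pvBitlen m - 1 + 1)
            then (List.range (m - 2 ^ (pvBitlen m - 1) + 1)).countP (fun r => popCnt r == p) else 0)).sum := by
      rw [List.range'_eq_map_range]
      exact block_count c (pvBitlen m - 1) (m - 2 ^ (pvBitlen m - 1) + 1) (by omega)
    rw [htop, show pvBitlen m - 1 + 1 = pvBitlen m by omega]
    omega

theorem pvF_step (c : Int) (m : Nat) (h : m ≠ 0) :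
    pvF c m = pvF c (m - 1) + (if goodN c m then 1 else 0) := by
  rw [pvF_correct, pvF_correct]
  have hm : m = (m - 1) + 1 := by omega
  conv_lhs => rw [hm, List.range'_concat]
  rw [show 1 + 1 * (m - 1) = m from by omega, List.countP_append]
  simp [List.countP_cons]

-- ---- A's per-number body equals condA ----
theorem count_go_single (ch : Char) (fuel : Nat) (l : List Char) (acc : Nat) (h : l.length ≤ fuel) :
    PySem.Chars.count.go [ch] fuel l acc = acc + l.count ch := by
  induction fuel generalizing l acc with
  | zero =>
    have hl : l = [] := by
      cases l with
      | nil => rfl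
      | cons a t => simp at h
    subst hl
    rw [PySem.Chars.count.go.eq_def]
    simp
  | succ fuel ih =>
    cases l with
    | nil =>
      rw [PySem.Chars.count.go.eq_def]
      simp
    | cons hd tl =>
      rw [PySem.Chars.count.go.eq_def]
      simp only [List.isPrefixOf, Bool.and_true]
      have hlen : List.drop [ch].length (hd :: tl) = tl := rfl
      by_cases hch : ch = hd
      · have hb : (ch == hd) = true := by simp [hch]
        have hb2 : (hd == ch) = true := by simp [hch]
        rw [if_pos hb, hlen, ih tl (acc + 1) (by simp at h; omega), List.count_cons, hb2]
        simp
        omega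
      · have hb : (ch == hd) = false := by simp [hch]
        have hb2 : (hd == ch) = false := by simp [Ne.symm hch]
        rw [if_neg (by simp [hb]), ih tl acc (by simp at h; omega), List.count_cons, hb2]
        simp

theorem count_single (l : List Char) (ch : Char) :
    PySem.Chars.count l [ch] = l.count ch := by
  unfold PySem.Chars.count
  simp only [List.isEmpty_cons, ite_false, Bool.false_eq_true]
  have := count_go_single ch l.length l 0 (le_refl _)
  omega

theorem digits_count (n : Nat) (h : n ≠ 0) :
    (Nat.toDigits 2 n).count '1' = popCnt n ∧
    (Nat.toDigits 2 n).count '0' + popCnt n = pvBitlen n := by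
  induction n using Nat.strong_induction_on with
  | _ n ih =>
    rcases Nat.lt_or_ge n 2 with h2 | h2
    · have hn1 : n = 1 := by omega
      subst hn1
      rw [Nat.toDigits_of_lt_base (by omega)]
      have hpc : popCnt 1 = 1 := by rw [popCnt_eq 1 (by omega)]; norm_num [popCnt]
      have hbl : pvBitlen 1 = 1 := by rw [pvBitlen_eq 1 (by omega)]; norm_num [pvBitlen]
      rw [hpc, hbl]
      constructor <;> decide
    · have hq : n / 2 ≠ 0 := by omega
      obtain ⟨ih1, ih0⟩ := ih (n / 2) (by omega) hq
      rw [Nat.toDigits_of_base_le (by omega) h2, List.count_append, List.count_append,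
          popCnt_eq n h, pvBitlen_eq n h]
      have hm : n % 2 = 0 ∨ n % 2 = 1 := by omega
      rcases hm with hm | hm <;> rw [hm]
      · have e1 : List.count '1' [Nat.digitChar 0] = 0 := by decide
        have e0 : List.count '0' [Nat.digitChar 0] = 1 := by decide
        rw [e1, e0]
        omega
      · have e1 : List.count '1' [Nat.digitChar 1] = 1 := by decide
        have e0 : List.count '0' [Nat.digitChar 1] = 0 := by decide
        rw [e1, e0]
        omega

theorem countSlice (n : Int) :
    PySem.Str.count (PySem.Str.slice (PySem.Int.pyBin n) (some 2) none) "1"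
        = popCnt n.natAbs ∧
    PySem.Str.count (PySem.Str.slice (PySem.Int.pyBin n) (some 2) none) "0"
        = (if n = 0 then 1 else pvBitlen n.natAbs - popCnt n.natAbs) := by
  have hdrop : (PySem.Str.slice (PySem.Int.pyBin n) (some 2) none).toList
      = List.drop 2 (PySem.Int.toBinChars0b n) := by
    rw [PySem.Str.toList_slice, PySem.Chars.slice_eq_listSlice, PySem.Int.toList_pyBin,
        PySem.List.slice_from _ (by omega : (0:Int) ≤ 2)]
    rfl
  have hc1 : PySem.Str.count (PySem.Str.slice (PySem.Int.pyBin n) (some 2) none) "1"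
      = (List.drop 2 (PySem.Int.toBinChars0b n)).count '1' := by
    rw [PySem.Str.count_eq, hdrop, show ("1" : String).toList = ['1'] from by decide, count_single]
  have hc0 : PySem.Str.count (PySem.Str.slice (PySem.Int.pyBin n) (some 2) none) "0"
      = (List.drop 2 (PySem.Int.toBinChars0b n)).count '0' := by
    rw [PySem.Str.count_eq, hdrop, show ("0" : String).toList = ['0'] from by decide, count_single]
  rw [hc1, hc0]
  rcases lt_trichotomy n 0 with hneg | hzero | hpos
  · have habs : n.natAbs ≠ 0 := by omega
    obtain ⟨d1, d0⟩ := digits_count n.natAbs habs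
    have hbc : PySem.Int.toBinChars0b n = '-' :: '0' :: 'b' :: Nat.toDigits 2 n.natAbs := by
      unfold PySem.Int.toBinChars0b
      rw [if_pos hneg]
    have hd2 : List.drop 2 ('-' :: '0' :: 'b' :: Nat.toDigits 2 n.natAbs)
        = 'b' :: Nat.toDigits 2 n.natAbs := rfl
    have hb1 : ('b' == '1') = false := by decide
    have hb0 : ('b' == '0') = false := by decide
    rw [hbc, hd2, if_neg (by omega : ¬ n = 0), List.count_cons, List.count_cons, hb1, hb0]
    constructor
    · simp [d1]
    · simp
      omega
  · subst hzero
    have e1 : List.count '1' (List.drop 2 (PySem.Int.toBinChars0b 0)) = 0 := by decide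
    have e0 : List.count '0' (List.drop 2 (PySem.Int.toBinChars0b 0)) = 1 := by decide
    rw [e1, e0, if_pos rfl]
    exact ⟨by simp [popCnt], rfl⟩
  · have habs : n.natAbs ≠ 0 := by omega
    obtain ⟨d1, d0⟩ := digits_count n.natAbs habs
    have hbc : PySem.Int.toBinChars0b n = '0' :: 'b' :: Nat.toDigits 2 n.toNat := by
      unfold PySem.Int.toBinChars0b
      rw [if_neg (by omega)]
    have htn : n.toNat = n.natAbs := by omega
    have hd2 : List.drop 2 ('0' :: 'b' :: Nat.toDigits 2 n.natAbs) = Nat.toDigits 2 n.natAbs := rfl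
    rw [hbc, htn, hd2, if_neg (by omega : ¬ n = 0)]
    exact ⟨d1, by omega⟩

theorem bodyA_eq (c : Int) (n : Int) (count : Int) :
    (if c == 0 then
       (if PySem.Str.count (PySem.Str.slice (PySem.Int.pyBin n) (some 2) none) "0"
            > PySem.Str.count (PySem.Str.slice (PySem.Int.pyBin n) (some 2) none) "1"
        then count + 1 else count)
     else if c == 1 then
       (if PySem.Str.count (PySem.Str.slice (PySem.Int.pyBin n) (some 2) none) "1"
            > PySem.Str.count (PySem.Str.slice (PySem.Int.pyBin n) (some 2) none) "0"
        then count + 1 else count)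
     else if c == 2 then
       (if PySem.Str.count (PySem.Str.slice (PySem.Int.pyBin n) (some 2) none) "1"
            == PySem.Str.count (PySem.Str.slice (PySem.Int.pyBin n) (some 2) none) "0"
        then count + 1 else count)
     else count)
      = if condA c n then count + 1 else count := by
  obtain ⟨h1, h0⟩ := countSlice n
  rw [h1, h0]
  by_cases hn : n = 0
  · subst hn
    simp only [if_pos rfl]
    unfold condA
    rw [if_pos rfl]
    have hpc0 : popCnt (0 : Int).natAbs = 0 := by norm_num [popCnt]
    rw [hpc0]
    by_cases hc0 : c = 0
    · simp [hc0]
    · by_cases hc1 : c = 1 <;> by_cases hc2 : c = 2 <;> simp [hc0, hc1, hc2]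
  · rw [if_neg hn]
    unfold condA pvOk
    rw [if_neg hn]
    by_cases hc0 : c = 0
    · simp [hc0]
    · by_cases hc1 : c = 1
      · simp [hc0, hc1]
      · by_cases hc2 : c = 2 <;> simp [hc0, hc1, hc2]

-- ---- pvCountUpto steps through condA on nonnegative arguments ----
theorem condA_nonzero (c n : Int) (h : n ≠ 0) : condA c n = goodN c n.natAbs := by
  simp [condA, goodN, h]

theorem pvCountUpto_neg (c : Int) (m : Int) (h : m < 0) : pvCountUpto c m = 0 := by
  unfold pvCountUpto
  rw [if_pos h]

theorem pvCountUpto_step (c : Int) (e : Int) (h : 0 ≤ e) :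
    pvCountUpto c e = pvCountUpto c (e - 1) + (if condA c e then 1 else 0) := by
  rcases eq_or_lt_of_le h with h0 | h1
  · -- e = 0
    have he : e = 0 := h0.symm
    subst he
    rw [pvCountUpto_neg c (0 - 1) (by omega)]
    unfold pvCountUpto
    rw [if_neg (by omega)]
    have hF : pvF c (0 : Int).toNat = 0 := by norm_num [pvF]
    have hcond : condA c 0 = (c == 0) := by norm_num [condA]
    rw [hF, hcond]
    by_cases hc : c = 0 <;> simp [hc]
  · -- e ≥ 1
    unfold pvCountUpto
    rw [if_neg (show ¬ e < 0 by omega), if_neg (show ¬ e - 1 < 0 by omega)]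
    have hstep := pvF_step c e.toNat (by omega)
    have hred : e.toNat - 1 = (e - 1).toNat := by omega
    rw [hred] at hstep
    have hcond : condA c e = goodN c e.toNat := by
      rw [condA_nonzero c e (by omega)]
      congr 1
      omega
    rw [hcond, hstep]
    push_cast [apply_ite (fun n : Nat => (n : Int))]
    split_ifs <;> omega

-- count over a nonnegative range as a difference of prefix counts
theorem main_count (c s : Int) (n : Nat) (hs : 0 ≤ s) :
    ((PySem.List.pyRange s (s + n) 1).countP (condA c) : Int)
      = pvCountUpto c (s - 1 + n) - pvCountUpto c (s - 1) := by
  induction n with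
  | zero =>
    rw [show s + ((0 : Nat) : Int) = s from by push_cast; ring,
        PySem.List.pyRange_one_eq_nil (le_refl s),
        show s - 1 + ((0 : Nat) : Int) = s - 1 from by push_cast; ring]
    simp
  | succ n ih =>
    rw [show s + ((n + 1 : Nat) : Int) = (s + n) + 1 from by push_cast; ring,
        PySem.List.pyRange_one_succ_right (by omega : s ≤ s + (n : Int)),
        List.countP_append,
        show s - 1 + ((n + 1 : Nat) : Int) = (s - 1 + n) + 1 from by push_cast; ring,
        pvCountUpto_step c ((s - 1 + n) + 1) (by omega),
        show ((s - 1 + (n : Int)) + 1) - 1 = s - 1 + n from by ring,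
        show (s - 1 + (n : Int)) + 1 = s + n from by ring]
    have hsing : List.countP (condA c) [s + (n : Int)] = if condA c (s + n) then 1 else 0 := by
      simp [List.countP_cons]
    rw [hsing]
    push_cast [apply_ite (fun k : Nat => (k : Int))]
    rw [ih]
    ring

-- with an unrecognised comparison choice nothing is ever counted
theorem pvOk_invalid (c : Int) (hc : ¬(c = 0 ∨ c = 1 ∨ c = 2)) (o l : Nat) : pvOk c o l = false := by
  have h : c ≠ 0 ∧ c ≠ 1 ∧ c ≠ 2 := by tauto
  simp [pvOk, h.1, h.2.1, h.2.2]

theorem condA_invalid (c : Int) (hc : ¬(c = 0 ∨ c = 1 ∨ c = 2)) (n : Int) : condA c n = false := by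
  have h0 : c ≠ 0 := by tauto
  unfold condA
  split_ifs
  · simp [h0]
  · exact pvOk_invalid c hc _ _

theorem pvCountUpto_invalid (c : Int) (hc : ¬(c = 0 ∨ c = 1 ∨ c = 2)) (m : Int) :
    pvCountUpto c m = 0 := by
  have h0 : (c == 0) = false := by simp; tauto
  by_cases hm : m < 0
  · exact pvCountUpto_neg c m hm
  · have hF : pvF c m.toNat = 0 := by
      rw [pvF_correct]
      apply List.countP_eq_zero.mpr
      intro n _
      simp [goodN, pvOk_invalid c hc]
    unfold pvCountUpto
    rw [if_neg hm]
    simp [h0, hF]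

-- ===== VERDICT (by name: the statement is the Claim_ definition above) =====
theorem get_answer_for_digit_count_problem_spec : Claim_equal_get_answer_for_digit_count_problem := by
  intro c s e _ hpre
  unfold Spec_get_answer_for_digit_count_problem
  unfold get_answer_for_digit_count_problem get_answer_for_digit_count_problem_alt
  by_cases hse : s > e
  · rw [if_pos hse, PySem.List.pyRange_one_eq_nil (by omega)]
    simp only [List.foldl_nil]
    decide
  · rw [if_neg hse]
    refine congrArg PySem.Int.toStr ?_
    have hfun : (fun (count : Int) (number : Int) =>
        let binary_representation := PySem.Str.slice (PySem.Int.pyBin number) (some 2) none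
        let count_ones := PySem.Str.count binary_representation "1"
        let count_zeros := PySem.Str.count binary_representation "0"
        if c == 0 then
          (if count_zeros > count_ones then count + 1 else count)
        else if c == 1 then
          (if count_ones > count_zeros then count + 1 else count)
        else if c == 2 then
          (if count_ones == count_zeros then count + 1 else count)
        else count)
        = (fun count number => if condA c number then count + 1 else count) := by
      funext count number
      exact bodyA_eq c number count
    rw [hfun, PySem.List.foldl_if_add_one (condA c) _ 0]
    by_cases hc : c = 0 ∨ c = 1 ∨ c = 2
    · have hs : 0 ≤ s := by
        rcases hpre with h | h | h
        · omega
        · exact h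
        · exact absurd hc h
      have hm := main_count c s ((e + 1 - s).toNat) hs
      rw [show (((e + 1 - s).toNat : Int)) = e + 1 - s from by omega,
          show s + (e + 1 - s) = e + 1 from by ring,
          show s - 1 + (e + 1 - s) = e from by ring] at hm
      rw [hm]
      ring
    · have hz : (PySem.List.pyRange s (e + 1) 1).countP (condA c) = 0 := by
        apply List.countP_eq_zero.mpr
        intro n _
        simp [condA_invalid c hc n]
      rw [hz, pvCountUpto_invalid c hc, pvCountUpto_invalid c hc]
      simp
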